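-- pv_equiv track=rewrite | github.com/eunhee-dev/problem-solving | 0x10_dynamic-programming/2579/solve_1d_2.py | solve
-- ===== SOURCE A (Python) =====
-- def solve(n: int, stairs: list[int]) -> int:
--     stairs = [0] + stairs
--     if n <= 2:
--         return sum(stairs)
--
--     dp = [0] * (n + 1)
--     dp[1] = stairs[1]
--     dp[2] = stairs[2]
--     dp[3] = stairs[3]
--
--     for i in range(4, n):
--         dp[i] = min(dp[i - 2], dp[i - 3]) + stairs[i]
--
--     return sum(stairs) - min(dp[n - 1], dp[n - 2])
-- ===== SOURCE B (Python) =====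
-- def solve(n: int, stairs: list[int]) -> int:
--     stairs = [0] + stairs
--     if n <= 2:
--         return sum(stairs)
--     # rolling max-score DP: c = best total reaching stair i stepping on it
--     a, b, c = 0, stairs[1], stairs[1] + stairs[2]
--     for i in range(3, n + 1):
--         a, b, c = b, c, stairs[i] + max(b, a + stairs[i - 1])
--     return c
-- ===== Notes on version B (the rewrite author's own statement) =====
-- stated objective: alternative
-- what changed: Replaced A's total-minus-minimal-skipped-score DP over an allocated dp array (dp[i]=min(dp[i-2],dp[i-3])+stairs[i], answer sum(stairs)-min(dp[n-1],dp[n-2])) by the direct maximal-score staircase DP carried in three rolling variables (c = stairs[i] + max(b, a + stairs[i-1])), returning the max directly with O(1) extra space and no final sum.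
-- outside the precondition, e.g. on solve(4, [5, 1, 2]): A returns 7, B raises IndexError; on solve(3, [1, 2, 3, 4]): A returns 9, B returns 5
import Mathlib
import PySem

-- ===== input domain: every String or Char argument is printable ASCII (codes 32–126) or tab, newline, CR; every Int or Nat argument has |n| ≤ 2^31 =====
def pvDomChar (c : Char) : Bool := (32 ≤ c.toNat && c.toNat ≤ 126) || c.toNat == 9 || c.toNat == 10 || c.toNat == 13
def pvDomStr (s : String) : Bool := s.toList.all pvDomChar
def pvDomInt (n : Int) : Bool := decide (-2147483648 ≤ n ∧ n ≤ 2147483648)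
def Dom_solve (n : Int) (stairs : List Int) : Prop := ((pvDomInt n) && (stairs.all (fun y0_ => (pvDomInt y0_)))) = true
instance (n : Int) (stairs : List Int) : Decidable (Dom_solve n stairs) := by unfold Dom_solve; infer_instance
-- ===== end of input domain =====

-- B replaces A's "total minus minimal skipped-score DP over an allocated dp array" by the direct
-- maximal-score staircase DP carried in three rolling variables (alternative algorithm, O(1) extra space).

-- ===== PORT A =====
def solve (n : Int) (stairs : List Int) : Int :=
  let st := 0 :: stairs                                -- stairs = [0] + stairs
  if n ≤ 2 then st.sum                                 -- if n <= 2: return sum(stairs)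
  else
    let dp0 := List.replicate (n + 1).toNat (0 : Int)  -- dp = [0] * (n + 1)
    let dp1 := PySem.List.pySetD dp0 1 (PySem.List.pyGetD st 1 0)   -- dp[1] = stairs[1]
    let dp2 := PySem.List.pySetD dp1 2 (PySem.List.pyGetD st 2 0)   -- dp[2] = stairs[2]
    let dp3 := PySem.List.pySetD dp2 3 (PySem.List.pyGetD st 3 0)   -- dp[3] = stairs[3]
    let dp := (PySem.List.pyRange 4 n 1).foldl         -- for i in range(4, n):
      (fun dp i => PySem.List.pySetD dp i
        (min (PySem.List.pyGetD dp (i - 2) 0) (PySem.List.pyGetD dp (i - 3) 0)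
          + PySem.List.pyGetD st i 0)) dp3             --   dp[i] = min(dp[i-2], dp[i-3]) + stairs[i]
    st.sum - min (PySem.List.pyGetD dp (n - 1) 0) (PySem.List.pyGetD dp (n - 2) 0)

-- ===== PORT B =====
def solve_alt (n : Int) (stairs : List Int) : Int :=
  let st := 0 :: stairs
  if n ≤ 2 then st.sum
  else
    -- a, b, c = 0, stairs[1], stairs[1] + stairs[2]; for i in range(3, n+1): roll
    let fin := (PySem.List.pyRange 3 (n + 1) 1).foldl
      (fun s i => (s.2.1, s.2.2,
        PySem.List.pyGetD st i 0 + max s.2.1 (s.1 + PySem.List.pyGetD st (i - 1) 0)))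
      ((0 : Int), PySem.List.pyGetD st 1 0, PySem.List.pyGetD st 1 0 + PySem.List.pyGetD st 2 0)
    fin.2.2

-- ===== PRECONDITION & SPEC =====
-- Pre_ excludes n ≥ 3 with len(stairs) ≠ n — inputs whose declared stair count contradicts the list:
-- A then raises IndexError (list one short) or accidentally adds the scores beyond stair n into the
-- answer by summing the whole list; B's DP reads exactly stairs 1..n (and raises when stair n is missing).
def Pre_solve (n : Int) (stairs : List Int) : Prop := n ≤ 2 ∨ (stairs.length : Int) = n
instance (n : Int) (stairs : List Int) : Decidable (Pre_solve n stairs) := by unfold Pre_solve; infer_instance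
def pvWitness_solve : Int × List Int := (3, [1, 2, 3])
def Spec_solve (n : Int) (stairs : List Int) (out : Int) : Prop := out = solve_alt n stairs
instance (n : Int) (stairs : List Int) (out : Int) : Decidable (Spec_solve n stairs out) := by unfold Spec_solve; infer_instance

-- ===== CLAIM (what is proved, stated in full; the proofs are below) =====
def Claim_equal_solve : Prop := ∀ (n : Int) (stairs : List Int), Dom_solve n stairs → Pre_solve n stairs → Spec_solve n stairs (solve n stairs)

-- ===== LEMMAS AND PROOFS =====

-- f j = st[j] (the 0-prepended list, Nat index; default 0 — never read out of range where used)
def gF (st : List Int) (j : Nat) : Int := st.getD j 0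

-- A's dp table as a pure recursion (the values A writes at indices 1 .. n-1)
def dpF (f : Nat → Int) : Nat → Int
  | 0 => 0
  | 1 => f 1
  | 2 => f 2
  | 3 => f 3
  | (j+4) => min (dpF f (j+2)) (dpF f (j+1)) + f (j+4)

-- B's rolling max-score DP as a pure recursion
def mF (f : Nat → Int) : Nat → Int
  | 0 => 0
  | 1 => f 1
  | 2 => f 1 + f 2
  | (j+3) => f (j+3) + max (mF f (j+1)) (mF f j + f (j+2))

-- prefix sum f 0 + … + f i
def psum (f : Nat → Int) : Nat → Int
  | 0 => f 0
  | (i+1) => psum f i + f (i+1)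

theorem mF_step (f : Nat → Int) (j : Nat) :
    mF f (j+3) = f (j+3) + max (mF f (j+1)) (mF f j + f (j+2)) := by rw [mF]

theorem dpF_step (f : Nat → Int) (j : Nat) :
    dpF f (j+4) = min (dpF f (j+2)) (dpF f (j+1)) + f (j+4) := by rw [dpF]

theorem psum_step (f : Nat → Int) (i : Nat) : psum f (i+1) = psum f i + f (i+1) := by rw [psum]

theorem psum_eq (f : Nat → Int) (i : Nat) :
    psum f i = ((List.range (i + 1)).map f).sum := by
  induction i with
  | zero => simp [psum]
  | succ i ih => rw [List.range_succ]; simp [psum, ih]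

theorem sum_map_getD_range (l : List Int) (k : Nat) (h : k ≤ l.length) :
    ((List.range k).map (fun j => l.getD j 0)).sum = (l.take k).sum := by
  induction k with
  | zero => simp
  | succ k ih =>
    rw [List.range_succ, List.map_append, List.sum_append, ih (by omega),
        List.sum_take_succ l k (by omega)]
    simp [List.getD, List.getElem?_eq_getElem (show k < l.length by omega)]

theorem psum_full (x : Int) (t : List Int) :
    psum (gF (x :: t)) t.length = (x :: t).sum := by
  rw [psum_eq]
  have h := sum_map_getD_range (x :: t) (t.length + 1) (by simp)
  rw [List.take_of_length_le (by simp)] at h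
  simpa [gF] using h

-- the heart: B's max DP equals the prefix total minus A's min-skip DP
theorem key (f : Nat → Int) (hf0 : f 0 = 0) :
    ∀ i : Nat, mF f (i + 3) = psum f (i + 3) - min (dpF f (i + 2)) (dpF f (i + 1)) := by
  intro i
  induction i using Nat.strong_induction_on with
  | _ i ih =>
    match i with
    | 0 =>
      show mF f 3 = psum f 3 - min (dpF f 2) (dpF f 1)
      rw [show (3:Nat) = 0+3 from rfl, mF_step]
      simp only [mF, dpF, psum, hf0, Nat.reduceAdd]
      omega
    | 1 =>
      show mF f 4 = psum f 4 - min (dpF f 3) (dpF f 2)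
      rw [show (4:Nat) = 1+3 from rfl, mF_step]
      simp only [mF, dpF, psum, Nat.reduceAdd]
      omega
    | 2 =>
      show mF f 5 = psum f 5 - min (dpF f 4) (dpF f 3)
      rw [show (5:Nat) = 2+3 from rfl, mF_step, show (2+1 : Nat) = 0+3 from rfl, mF_step,
          show (4:Nat) = 0+4 from rfl, dpF_step]
      simp only [mF, dpF, psum, hf0, Nat.reduceAdd]
      omega
    | (j+3) =>
      have h1 := ih (j+1) (by omega)
      have h2 := ih j (by omega)
      simp only [show j+1+3 = j+4 from rfl, show j+1+2 = j+3 from rfl,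
        show j+1+1 = j+2 from rfl] at h1
      show mF f (j+6) = psum f (j+6) - min (dpF f (j+5)) (dpF f (j+4))
      have e1 : mF f (j+6) = f (j+6) + max (mF f (j+4)) (mF f (j+3) + f (j+5)) := by
        have := mF_step f (j+3)
        simpa [show j+3+3 = j+6 from rfl, show j+3+1 = j+4 from rfl,
          show j+3+2 = j+5 from rfl] using this
      have e2 : dpF f (j+5) = min (dpF f (j+3)) (dpF f (j+2)) + f (j+5) := by
        have := dpF_step f (j+1)
        simpa [show j+1+4 = j+5 from rfl, show j+1+2 = j+3 from rfl,
          show j+1+1 = j+2 from rfl] using this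
      have e3 : dpF f (j+4) = min (dpF f (j+2)) (dpF f (j+1)) + f (j+4) := dpF_step f j
      have e4 : psum f (j+6) = psum f (j+4) + f (j+5) + f (j+6) := by
        rw [show j+6 = (j+5)+1 from rfl, psum_step, show j+5 = (j+4)+1 from rfl, psum_step]
      have e5 : psum f (j+4) = psum f (j+3) + f (j+4) := psum_step f (j+3)
      rw [e1, e2, e3, e4, h1, h2, e5]
      omega

-- B's fold over range(3, 3+k) carries (mF k, mF (k+1), mF (k+2))
theorem foldB (st : List Int) (k : Nat) :
    (PySem.List.pyRange 3 (3 + (k : Int)) 1).foldl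
      (fun s i => (s.2.1, s.2.2,
        PySem.List.pyGetD st i 0 + max s.2.1 (s.1 + PySem.List.pyGetD st (i - 1) 0)))
      ((0 : Int), PySem.List.pyGetD st 1 0, PySem.List.pyGetD st 1 0 + PySem.List.pyGetD st 2 0)
    = (mF (gF st) k, mF (gF st) (k+1), mF (gF st) (k+2)) := by
  induction k with
  | zero =>
    rw [show (3 + ((0:Nat) : Int)) = 3 by norm_num, PySem.List.pyRange_one_eq_nil (by omega)]
    simp only [List.foldl_nil, mF, gF]
    rw [show ((1:Int)) = ((1:Nat):Int) from rfl, show ((2:Int)) = ((2:Nat):Int) from rfl,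
        PySem.List.pyGetD_natCast, PySem.List.pyGetD_natCast]
  | succ k ih =>
    rw [show (3 + ((k+1 : Nat) : Int)) = (3 + (k:Int)) + 1 by push_cast; ring,
        PySem.List.pyRange_one_succ_right (by omega), List.foldl_append, ih]
    simp only [List.foldl_cons, List.foldl_nil]
    have c2 : (3 + (k:Int) - 1) = ((k + 2 : Nat) : Int) := by push_cast; ring
    have c1 : (3 + (k:Int)) = ((k + 3 : Nat) : Int) := by push_cast; ring
    rw [c2, c1, PySem.List.pyGetD_natCast, PySem.List.pyGetD_natCast]
    rw [show k+1+1 = k+2 from rfl, show k+1+2 = k+3 from rfl, mF_step]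
    rfl

theorem solve_alt_eval (n : Int) (stairs : List Int) (hn : ¬ n ≤ 2)
    (hlen : (stairs.length : Int) = n) :
    solve_alt n stairs = mF (gF (0 :: stairs)) stairs.length := by
  simp only [solve_alt, if_neg hn]
  have hN : 3 ≤ stairs.length := by omega
  have h1 : (n + 1) = 3 + ((stairs.length - 2 : Nat) : Int) := by
    push_cast [Nat.cast_sub (by omega : 2 ≤ stairs.length)]; omega
  rw [h1, foldB]
  have h2 : stairs.length - 2 + 2 = stairs.length := by omega
  rw [h2]

theorem getD_set_self_int (l : List Int) (i : Nat) (v : Int) (h : i < l.length) :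
    (l.set i v).getD i 0 = v := by
  simp [List.getD, List.getElem?_set, h]

theorem getD_dp0 (st : List Int) (L : Nat) (hL : 4 ≤ L) (m : Nat) :
    (PySem.List.pySetD (PySem.List.pySetD (PySem.List.pySetD
        (List.replicate L (0 : Int)) 1 (PySem.List.pyGetD st 1 0))
        2 (PySem.List.pyGetD st 2 0)) 3 (PySem.List.pyGetD st 3 0)).getD m 0
      = if 1 ≤ m ∧ m ≤ 3 then dpF (gF st) m else 0 := by
  rw [show ((1:Int)) = ((1:Nat):Int) from rfl, show ((2:Int)) = ((2:Nat):Int) from rfl,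
      show ((3:Int)) = ((3:Nat):Int) from rfl]
  rw [PySem.List.pyGetD_natCast, PySem.List.pyGetD_natCast, PySem.List.pyGetD_natCast,
      PySem.List.pySetD_natCast, PySem.List.pySetD_natCast, PySem.List.pySetD_natCast]
  by_cases h1 : m < L
  · match m, h1 with
    | 0, _ => simp [List.getD, List.getElem?_set, List.getElem?_replicate, show 0 < L by omega]
    | 1, _ => simp [List.getD, List.getElem?_set, dpF, gF, show 1 < L by omega]
    | 2, _ => simp [List.getD, List.getElem?_set, dpF, gF, show 2 < L by omega]
    | 3, _ => simp [List.getD, List.getElem?_set, dpF, gF, show 3 < L by omega]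
    | (m+4), h => simp [List.getD, List.getElem?_set, List.getElem?_replicate, h]
  · rw [if_neg (by omega)]
    apply List.getD_eq_default
    simpa using (by omega : L ≤ m)

theorem length_foldl_setA (st : List Int) (is : List Int) (l : List Int) :
    (is.foldl (fun dp i => PySem.List.pySetD dp i
        (min (PySem.List.pyGetD dp (i - 2) 0) (PySem.List.pyGetD dp (i - 3) 0)
          + PySem.List.pyGetD st i 0)) l).length = l.length := by
  induction is generalizing l with
  | nil => rfl
  | cons a t ih => simp [List.foldl_cons, ih, PySem.List.length_pySetD]

-- A's loop invariant: after range(4, 4+j) the array holds dpF at indices 1 .. 3+j, 0 elsewhere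
theorem loopA (st : List Int) (N : Nat) (hN : 3 ≤ N) (j : Nat) (hj : 3 + j ≤ N) :
    ∀ m : Nat,
    ((PySem.List.pyRange 4 (4 + (j : Int)) 1).foldl
      (fun dp i => PySem.List.pySetD dp i
        (min (PySem.List.pyGetD dp (i - 2) 0) (PySem.List.pyGetD dp (i - 3) 0)
          + PySem.List.pyGetD st i 0))
      (PySem.List.pySetD (PySem.List.pySetD (PySem.List.pySetD
        (List.replicate (N + 1) (0 : Int)) 1 (PySem.List.pyGetD st 1 0))
        2 (PySem.List.pyGetD st 2 0)) 3 (PySem.List.pyGetD st 3 0))).getD m 0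
    = if 1 ≤ m ∧ m ≤ 3 + j then dpF (gF st) m else 0 := by
  induction j with
  | zero =>
    intro m
    rw [show (4 + ((0:Nat) : Int)) = 4 by norm_num, PySem.List.pyRange_one_eq_nil (by omega)]
    simp only [List.foldl_nil]
    exact getD_dp0 st (N + 1) (by omega) m
  | succ j ih =>
    intro m
    rw [show (4 + ((j+1 : Nat) : Int)) = (4 + (j:Int)) + 1 by push_cast; ring,
        PySem.List.pyRange_one_succ_right (by omega), List.foldl_append]
    simp only [List.foldl_cons, List.foldl_nil]
    set dpj := ((PySem.List.pyRange 4 (4 + (j : Int)) 1).foldl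
      (fun dp i => PySem.List.pySetD dp i
        (min (PySem.List.pyGetD dp (i - 2) 0) (PySem.List.pyGetD dp (i - 3) 0)
          + PySem.List.pyGetD st i 0))
      (PySem.List.pySetD (PySem.List.pySetD (PySem.List.pySetD
        (List.replicate (N + 1) (0 : Int)) 1 (PySem.List.pyGetD st 1 0))
        2 (PySem.List.pyGetD st 2 0)) 3 (PySem.List.pyGetD st 3 0))) with hdpj
    have hget := ih (by omega)
    have hL : dpj.length = N + 1 := by
      rw [hdpj, length_foldl_setA]
      simp [PySem.List.length_pySetD]
    have c2 : (4 + (j:Int) - 2) = ((j + 2 : Nat) : Int) := by push_cast; ring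
    have c3 : (4 + (j:Int) - 3) = ((j + 1 : Nat) : Int) := by push_cast; ring
    have c4 : (4 + (j:Int)) = ((j + 4 : Nat) : Int) := by push_cast; ring
    rw [c2, c3, c4, PySem.List.pyGetD_natCast, PySem.List.pyGetD_natCast,
        PySem.List.pyGetD_natCast, PySem.List.pySetD_natCast]
    rw [hget (j+2), hget (j+1), if_pos (by omega : 1 ≤ j+2 ∧ j+2 ≤ 3+j),
        if_pos (by omega : 1 ≤ j+1 ∧ j+1 ≤ 3+j)]
    by_cases hm : m = j + 4
    · subst hm
      rw [getD_set_self_int _ _ _ (by rw [hL]; omega),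
          if_pos (by omega), dpF_step]
      rfl
    · have hne : (dpj.set (j+4) (min (dpF (gF st) (j+2)) (dpF (gF st) (j+1))
          + st.getD (j+4) 0)).getD m 0 = dpj.getD m 0 := by
        simp [List.getD, List.getElem?_set, hm, Ne.symm hm]
      rw [hne, hget m]
      split_ifs <;> first | rfl | omega

theorem solve_eval (n : Int) (stairs : List Int) (hn : ¬ n ≤ 2)
    (hlen : (stairs.length : Int) = n) :
    solve n stairs = (0 :: stairs).sum
      - min (dpF (gF (0 :: stairs)) (stairs.length - 1)) (dpF (gF (0 :: stairs)) (stairs.length - 2)) := by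
  simp only [solve, if_neg hn]
  have hN : 3 ≤ stairs.length := by omega
  have hc1 : n - 1 = ((stairs.length - 1 : Nat) : Int) := by
    push_cast [Nat.cast_sub (by omega : 1 ≤ stairs.length)]; omega
  have hc2 : n - 2 = ((stairs.length - 2 : Nat) : Int) := by
    push_cast [Nat.cast_sub (by omega : 2 ≤ stairs.length)]; omega
  have hc3 : (n + 1).toNat = stairs.length + 1 := by omega
  rw [hc1, hc2, hc3, PySem.List.pyGetD_natCast, PySem.List.pyGetD_natCast]
  by_cases hN4 : 4 ≤ stairs.length
  · have hc4 : (n : Int) = 4 + ((stairs.length - 4 : Nat) : Int) := by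
      push_cast [Nat.cast_sub (by omega : 4 ≤ stairs.length)]; omega
    rw [hc4, loopA (0 :: stairs) stairs.length hN (stairs.length - 4) (by omega) (stairs.length - 1),
        loopA (0 :: stairs) stairs.length hN (stairs.length - 4) (by omega) (stairs.length - 2),
        if_pos (by omega), if_pos (by omega)]
  · have h3 : stairs.length = 3 := by omega
    rw [PySem.List.pyRange_one_eq_nil (by omega : n ≤ 4)]
    simp only [List.foldl_nil]
    rw [getD_dp0 (0 :: stairs) (stairs.length + 1) (by omega) (stairs.length - 1),
        getD_dp0 (0 :: stairs) (stairs.length + 1) (by omega) (stairs.length - 2),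
        if_pos (by omega), if_pos (by omega)]

-- ===== VERDICT (by name: the statement is the Claim_ definition above) =====
theorem solve_spec : Claim_equal_solve := by
  unfold Claim_equal_solve
  intro n stairs _ hpre
  unfold Spec_solve
  by_cases hn : n ≤ 2
  · simp [solve, solve_alt, hn]
  · have hlen : (stairs.length : Int) = n := hpre.resolve_left hn
    have hN : 3 ≤ stairs.length := by omega
    rw [solve_alt_eval n stairs hn hlen, solve_eval n stairs hn hlen]
    have hkey := key (gF (0 :: stairs)) rfl (stairs.length - 3)
    rw [show stairs.length - 3 + 3 = stairs.length by omega,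
        show stairs.length - 3 + 2 = stairs.length - 1 by omega,
        show stairs.length - 3 + 1 = stairs.length - 2 by omega] at hkey
    rw [hkey]
    have hfull := psum_full 0 stairs
    rw [hfull]
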